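-- pv_equiv track=rewrite | github.com/ivantohelpyou/spawn-experiments | experiments/001-unicode-password-manager/method-2-spec-first/password_generator.py | _exclude_similar_characters
-- ===== SOURCE A (Python) =====
-- def _exclude_similar_characters(chars: str) -> str:
--     """
--     Remove visually similar characters to prevent confusion
--     Examples: 0/O, 1/l/I, etc.
--     """
--     similar_groups = [
--         "0O",  # Zero and capital O
--         "1lI|",  # One, lowercase L, capital I, pipe
--         "2Z",  # Two and Z in some fonts
--         "5S",  # Five and S
--         "6G",  # Six and G
--         "8B",  # Eight and B
--         "9g",  # Nine and g
--     ]
--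
--     filtered_chars = ""
--     for char in chars:
--         # Keep character if it's not in any similar group
--         # (or keep only the first character from each group)
--         should_keep = True
--         for group in similar_groups:
--             if char in group and group.index(char) > 0:
--                 should_keep = False
--                 break
--         if should_keep:
--             filtered_chars += char
--
--     return filtered_chars
-- ===== SOURCE B (Python) =====
-- def _exclude_similar_characters(chars: str) -> str:
--     """
--     Remove visually similar characters to prevent confusion
--     Examples: 0/O, 1/l/I, etc.
--     """
--     similar_groups = [
--         "0O",
--         "1lI|",
--         "2Z",
--         "5S",
--         "6G",
--         "8B",
--         "9g",
--     ]
--     # staged passes: delete every confusable (each group's tail) from the whole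
--     # string with one replace pass per confusable character
--     for group in similar_groups:
--         for confusable in group[1:]:
--             chars = chars.replace(confusable, "")
--     return chars
-- ===== Notes on version B (the rewrite author's own statement) =====
-- stated objective: alternative
-- what changed: Instead of one pass over the input with a nested per-character Python-level scan of all groups (with group.index), B performs staged whole-string deletion passes, one C-level str.replace sweep per group-tail character.
import Mathlib
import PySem

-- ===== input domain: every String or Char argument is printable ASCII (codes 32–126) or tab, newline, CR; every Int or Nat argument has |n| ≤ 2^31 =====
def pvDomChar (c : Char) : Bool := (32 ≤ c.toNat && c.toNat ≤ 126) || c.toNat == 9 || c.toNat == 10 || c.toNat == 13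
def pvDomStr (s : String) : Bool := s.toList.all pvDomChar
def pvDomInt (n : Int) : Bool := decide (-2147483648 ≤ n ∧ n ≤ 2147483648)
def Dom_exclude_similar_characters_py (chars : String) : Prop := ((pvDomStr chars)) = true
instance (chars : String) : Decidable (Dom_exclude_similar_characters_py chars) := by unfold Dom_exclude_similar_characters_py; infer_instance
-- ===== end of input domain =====

-- B replaces A's single pass with a nested per-character scan of all groups by staged
-- whole-string deletion passes, one str.replace(confusable, "") sweep per group-tail
-- character (alternative decomposition; a timing run measured B faster by a constant factor).

-- ===== PORT A =====
def pvGroups : List (List Char) :=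
  ["0O".toList, "1lI|".toList, "2Z".toList, "5S".toList, "6G".toList, "8B".toList, "9g".toList]

-- inner 'for group in similar_groups' loop with its break, computing should_keep
def pvShouldKeepA (c : Char) : List (List Char) → Bool
  | [] => true
  | g :: gs => if g.contains c && ((PySem.List.index? g c).getD 0 > 0) then false
               else pvShouldKeepA c gs

def exclude_similar_characters_py (chars : String) : String :=
  String.ofList (chars.toList.foldl
    (fun acc c => if pvShouldKeepA c pvGroups then acc ++ [c] else acc) [])

-- ===== PORT B =====
-- 'for group in similar_groups: for confusable in group[1:]: chars = chars.replace(confusable, "")'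
def exclude_similar_characters_py_alt (chars : String) : String :=
  pvGroups.foldl
    (fun s g => (g.drop 1).foldl
      (fun s confusable => PySem.Str.replace s (String.ofList [confusable]) "") s)
    chars

-- ===== PRECONDITION & SPEC =====
def Spec_exclude_similar_characters_py (chars : String) (out : String) : Prop := out = exclude_similar_characters_py_alt chars
instance (chars : String) (out : String) : Decidable (Spec_exclude_similar_characters_py chars out) := by unfold Spec_exclude_similar_characters_py; infer_instance

-- ===== CLAIM (what is proved, stated in full; the proofs are below) =====
def Claim_equal_exclude_similar_characters_py : Prop := ∀ (chars : String), Dom_exclude_similar_characters_py chars → Spec_exclude_similar_characters_py chars (exclude_similar_characters_py chars)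

-- ===== LEMMAS AND PROOFS =====

-- replace.go with a single-character pattern and empty replacement filters that character out
theorem pv_replace_go_single (b : Char) :
    ∀ (l acc : List Char) (fuel : Nat), l.length ≤ fuel →
    PySem.Chars.replace.go [b] [] fuel l acc = acc.reverse ++ l.filter (· != b) := by
  intro l
  induction l with
  | nil =>
    intro acc fuel _
    cases fuel <;> simp [PySem.Chars.replace.go]
  | cons c t ih =>
    intro acc fuel hle
    cases fuel with
    | zero => simp at hle
    | succ f =>
      simp only [PySem.Chars.replace.go]
      simp only [List.length_cons] at hle
      by_cases hc : c = b
      · subst hc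
        rw [if_pos (by simp [List.isPrefixOf])]
        simp only [List.length_singleton, List.drop_succ_cons, List.drop_zero,
          List.reverse_nil, List.nil_append]
        rw [ih acc f (by omega)]
        simp
      · rw [if_neg (by simp [List.isPrefixOf]; exact fun h => hc h.symm)]
        rw [ih (c :: acc) f (by omega)]
        simp [hc]

-- str.replace(ch, "") removes every occurrence of ch
theorem pv_replace_single (s : String) (b : Char) :
    PySem.Str.replace s (String.ofList [b]) "" = String.ofList (s.toList.filter (· != b)) := by
  simp only [PySem.Str.replace, PySem.Chars.replace, String.toList_ofList, String.toList_empty]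
  rw [if_neg (by simp)]
  rw [pv_replace_go_single b s.toList [] s.toList.length le_rfl]
  simp

-- a fold of single-character deletions is one filter against the list of deleted characters
theorem pv_fold_replace (es : List Char) :
    ∀ s : String,
    es.foldl (fun s e => PySem.Str.replace s (String.ofList [e]) "") s
      = String.ofList (s.toList.filter (fun c => !es.contains c)) := by
  induction es with
  | nil => intro s; simp
  | cons e es ih =>
    intro s
    simp only [List.foldl_cons]
    rw [pv_replace_single, ih]
    simp only [String.toList_ofList, List.filter_filter]
    congr 1
    apply List.filter_congr
    intro c _
    by_cases h : c = e <;> simp [h]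

-- the nested group/tail fold is the fold over the flattened tails
theorem pv_nested_fold (gs : List (List Char)) :
    ∀ s : String,
    gs.foldl (fun s g => (g.drop 1).foldl
        (fun s confusable => PySem.Str.replace s (String.ofList [confusable]) "") s) s
      = (gs.flatMap (fun g => g.drop 1)).foldl
          (fun s e => PySem.Str.replace s (String.ofList [e]) "") s := by
  induction gs with
  | nil => intro s; simp
  | cons g gs ih =>
    intro s
    rw [List.foldl_cons, List.flatMap_cons, List.foldl_append, ih]

-- A's per-character keep test agrees with membership in the flattened tails
theorem pv_keep_eq (c : Char) :
    pvShouldKeepA c pvGroups = !(pvGroups.flatMap (fun g => g.drop 1)).contains c := by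
  by_cases h : c ∈ ['0','O','1','l','I','|','2','Z','5','S','6','G','8','B','9','g']
  · simp only [List.mem_cons, List.not_mem_nil, or_false] at h
    rcases h with rfl|rfl|rfl|rfl|rfl|rfl|rfl|rfl|rfl|rfl|rfl|rfl|rfl|rfl|rfl|rfl <;> decide
  · simp only [List.mem_cons, List.not_mem_nil, or_false, not_or] at h
    obtain ⟨h1,h2,h3,h4,h5,h6,h7,h8,h9,h10,h11,h12,h13,h14,h15,h16⟩ := h
    simp [pvShouldKeepA, pvGroups, PySem.List.index?_eq_idxOf?,
      h1,h2,h3,h4,h5,h6,h7,h8,h9,h10,h11,h12,h13,h14,h15,h16]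

theorem pv_foldl_filter (p : Char → Bool) (l acc : List Char) :
    l.foldl (fun acc c => if p c then acc ++ [c] else acc) acc = acc ++ l.filter p := by
  induction l generalizing acc with
  | nil => simp
  | cons x xs ih =>
    simp only [List.foldl_cons, List.filter_cons]
    by_cases hp : p x <;> simp [hp, ih]

-- ===== VERDICT (by name: the statement is the Claim_ definition above) =====
theorem exclude_similar_characters_py_spec : Claim_equal_exclude_similar_characters_py := by
  intro chars _
  unfold Spec_exclude_similar_characters_py exclude_similar_characters_py exclude_similar_characters_py_alt
  rw [pv_nested_fold, pv_fold_replace, pv_foldl_filter]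
  simp only [List.nil_append]
  congr 1
  apply List.filter_congr
  intro c _
  exact pv_keep_eq c
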